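-- pv_equiv track=rewrite | github.com/cenk1cenk2/.dotfiles | wayland/.config/wayland/scripts/lib/mcp_server.py | _parse_resource_uri
-- ===== SOURCE A (Python) =====
-- from typing import Any, Callable, Optional
--
-- RESOURCE_SCHEME = "pilot"
--
-- def _parse_resource_uri(uri: str) -> Optional[tuple[str, str]]:
--     """Map either scheme variant into `(kind, tail)`. Returns None for
--     unrecognised URIs so callers can raise a clean "unknown resource"
--     error."""
--     if not uri:
--         return None
--     prefix = f"{RESOURCE_SCHEME}://"
--     body = uri[len(prefix) :] if uri.startswith(prefix) else uri
--     for kind in ("skill/", "reference/"):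
--         if body.startswith(kind):
--             return kind[:-1], body[len(kind) :]
--     return None
-- ===== SOURCE B (Python) =====
-- from typing import Optional
--
-- RESOURCE_SCHEME = "pilot"
--
-- def _parse_resource_uri(uri: str) -> Optional[tuple[str, str]]:
--     """Split the body once at the first '/' and test the head against the
--     known kinds, instead of scanning candidate prefixes with startswith."""
--     if not uri:
--         return None
--     prefix = f"{RESOURCE_SCHEME}://"
--     body = uri[len(prefix):] if uri.startswith(prefix) else uri
--     head, sep, tail = body.partition("/")
--     if sep and head in {"skill", "reference"}:
--         return (head, tail)
--     return None
-- ===== Notes on version B (the rewrite author's own statement) =====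
-- stated objective: simpler
-- what changed: Instead of looping over the two candidate kind prefixes with startswith and slicing off the match, B splits the body once at its first slash via str.partition and tests the resulting head for membership in the set of known kind names.
import Mathlib
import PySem

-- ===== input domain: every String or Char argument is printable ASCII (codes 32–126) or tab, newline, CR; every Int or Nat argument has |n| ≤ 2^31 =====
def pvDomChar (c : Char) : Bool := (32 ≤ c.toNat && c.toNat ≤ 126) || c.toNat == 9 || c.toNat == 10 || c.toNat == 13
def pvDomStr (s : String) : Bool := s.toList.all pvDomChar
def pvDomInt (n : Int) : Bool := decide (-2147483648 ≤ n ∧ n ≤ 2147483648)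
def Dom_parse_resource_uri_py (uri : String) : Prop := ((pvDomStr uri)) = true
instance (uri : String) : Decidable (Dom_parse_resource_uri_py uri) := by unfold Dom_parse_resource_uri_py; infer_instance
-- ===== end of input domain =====

-- B replaces A's startswith-scan over the candidate kind prefixes by one str.partition
-- at the first slash plus a set-membership test on the head (objective: simpler).


-- ===== PORT A =====
-- the for-loop over ("skill/", "reference/"): first matching prefix wins
def pvLoopA (body : String) : List String → Option (String × String)
  | [] => none
  | kind :: rest =>
      if PySem.Str.startswith body kind then
        some (PySem.Str.slice kind none (some (-1)),
              PySem.Str.slice body (some (PySem.Str.len kind)) none)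
      else pvLoopA body rest

def parse_resource_uri_py (uri : String) : Option (String × String) :=
  if uri = "" then none
  else
    let pfx := "pilot://"
    let body := if PySem.Str.startswith uri pfx
                then PySem.Str.slice uri (some (PySem.Str.len pfx)) none
                else uri
    pvLoopA body ["skill/", "reference/"]

-- ===== PORT B =====
-- hand port of str.partition("/") on the char list: exact for a one-char separator —
-- (before first '/', whether a '/' occurred, after it); ('h','',\'') shape when absent.
def pvPartitionSlash : List Char → List Char × Bool × List Char
  | [] => ([], false, [])
  | c :: cs =>
      if c = '/' then ([], true, cs)
      else
        let r := pvPartitionSlash cs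
        (c :: r.1, r.2.1, r.2.2)

def parse_resource_uri_py_alt (uri : String) : Option (String × String) :=
  if uri = "" then none
  else
    let pfx := "pilot://"
    let body := if PySem.Str.startswith uri pfx
                then PySem.Str.slice uri (some (PySem.Str.len pfx)) none
                else uri
    let r := pvPartitionSlash body.toList
    if r.2.1 && (r.1 = "skill".toList || r.1 = "reference".toList) then
      some (String.ofList r.1, String.ofList r.2.2)
    else none

-- ===== PRECONDITION & SPEC =====
def Spec_parse_resource_uri_py (uri : String) (out : Option (String × String)) : Prop := out = parse_resource_uri_py_alt uri
instance (uri : String) (out : Option (String × String)) : Decidable (Spec_parse_resource_uri_py uri out) := by unfold Spec_parse_resource_uri_py; infer_instance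

-- ===== CLAIM (what is proved, stated in full; the proofs are below) =====
def Claim_equal_parse_resource_uri_py : Prop := ∀ (uri : String), Dom_parse_resource_uri_py uri → Spec_parse_resource_uri_py uri (parse_resource_uri_py uri)

-- ===== LEMMAS AND PROOFS =====

-- partition at the first '/' reassembles the input
theorem pvPartitionSlash_sep_eq {bs h t : List Char}
    (hp : pvPartitionSlash bs = (h, true, t)) : bs = h ++ '/' :: t := by
  induction bs generalizing h t with
  | nil => simp [pvPartitionSlash] at hp
  | cons c cs ih =>
    by_cases hc : c = '/'
    · simp [pvPartitionSlash, hc] at hp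
      simp [hc, hp.1, hp.2]
    · rcases hr : pvPartitionSlash cs with ⟨h', s', t'⟩
      simp [pvPartitionSlash, hc, hr] at hp
      obtain ⟨h1, h2, h3⟩ := hp
      subst h1; subst h3
      simpa using congrArg (c :: ·) (ih (h2 ▸ hr))

-- a slash-free head followed by '/' is what partition returns
theorem pvPartitionSlash_of_prefix {h : List Char} (hh : '/' ∉ h) (t : List Char) :
    pvPartitionSlash (h ++ '/' :: t) = (h, true, t) := by
  induction h with
  | nil => simp [pvPartitionSlash]
  | cons c cs ih =>
    simp at hh
    simp [pvPartitionSlash, Ne.symm hh.1, ih hh.2]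

-- slicing off a matched kind prefix leaves exactly the partition tail
theorem pvMatch_skill (body : String) (rest : List Char)
    (hrest : body.toList = "skill".toList ++ '/' :: rest) :
    PySem.Str.slice body (some (PySem.Str.len ("skill/" : String))) none = String.ofList rest := by
  apply String.toList_inj.mp
  have h6 : PySem.Str.len ("skill/" : String) = 6 := by decide
  rw [h6]
  simp only [PySem.Str.toList_slice, PySem.Chars.slice_eq_listSlice]
  rw [PySem.List.slice_from body.toList (by norm_num), hrest]
  simp [show ("skill".toList) = ['s','k','i','l','l'] from by decide]

theorem pvMatch_reference (body : String) (rest : List Char)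
    (hrest : body.toList = "reference".toList ++ '/' :: rest) :
    PySem.Str.slice body (some (PySem.Str.len ("reference/" : String))) none = String.ofList rest := by
  apply String.toList_inj.mp
  have h10 : PySem.Str.len ("reference/" : String) = 10 := by decide
  rw [h10]
  simp only [PySem.Str.toList_slice, PySem.Chars.slice_eq_listSlice]
  rw [PySem.List.slice_from body.toList (by norm_num), hrest]
  simp [show ("reference".toList) = ['r','e','f','e','r','e','n','c','e'] from by decide]

-- startswith decomposes the body
theorem pvStarts_decomp (body : String) (kind : String)
    (h : PySem.Str.startswith body kind = true) :
    ∃ rest, body.toList = kind.toList ++ rest := by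
  obtain ⟨t, ht⟩ := (PySem.Chars.startswith_iff _ _).mp (by simpa using h)
  exact ⟨t, ht.symm⟩

-- the core agreement, for an arbitrary body string
theorem pvBody_agree (body : String) :
    pvLoopA body ["skill/", "reference/"] =
      (let r := pvPartitionSlash body.toList
       if r.2.1 && (r.1 = "skill".toList || r.1 = "reference".toList) then
         some (String.ofList r.1, String.ofList r.2.2)
       else none) := by
  by_cases h1 : PySem.Str.startswith body "skill/" = true
  · obtain ⟨rest, hrest⟩ := pvStarts_decomp body "skill/" h1
    have hrest' : body.toList = "skill".toList ++ '/' :: rest := by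
      rw [hrest]; rfl
    simp only [pvLoopA, h1, if_pos]
    rw [hrest', pvPartitionSlash_of_prefix (by decide)]
    simp only [decide_true, Bool.true_and]
    rw [if_pos (by simp), pvMatch_skill body rest hrest']
    have : PySem.Str.slice "skill/" none (some (-1)) = String.ofList "skill".toList := by decide
    rw [this]
  · by_cases h2 : PySem.Str.startswith body "reference/" = true
    · obtain ⟨rest, hrest⟩ := pvStarts_decomp body "reference/" h2
      have hrest' : body.toList = "reference".toList ++ '/' :: rest := by
        rw [hrest]; rfl
      simp only [pvLoopA, h1, h2, if_pos, if_neg, Bool.false_eq_true, not_false_iff]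
      rw [hrest', pvPartitionSlash_of_prefix (by decide)]
      simp only [decide_true, Bool.true_and]
      rw [if_pos (by simp), pvMatch_reference body rest hrest']
      have : PySem.Str.slice "reference/" none (some (-1)) = String.ofList "reference".toList := by decide
      rw [this]
    · simp only [pvLoopA, h1, h2, if_neg, Bool.false_eq_true, not_false_iff]
      rcases hr : pvPartitionSlash body.toList with ⟨h, s, t⟩
      simp only
      rw [if_neg]
      intro hcond
      simp only [Bool.and_eq_true, Bool.or_eq_true, decide_eq_true_eq] at hcond
      obtain ⟨hs, hh⟩ := hcond
      subst hs
      have hb := pvPartitionSlash_sep_eq hr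
      rcases hh with hh | hh
      · apply h1
        rw [PySem.Str.startswith_eq, PySem.Chars.startswith_iff]
        exact ⟨t, by rw [hb, hh]; rfl⟩
      · apply h2
        rw [PySem.Str.startswith_eq, PySem.Chars.startswith_iff]
        exact ⟨t, by rw [hb, hh]; rfl⟩

-- ===== VERDICT (by name: the statement is the Claim_ definition above) =====
theorem parse_resource_uri_py_spec : Claim_equal_parse_resource_uri_py := by
  intro uri _
  unfold Spec_parse_resource_uri_py parse_resource_uri_py parse_resource_uri_py_alt
  by_cases h : uri = ""
  · simp [h]
  · simp only [h, if_neg, not_false_iff]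
    exact pvBody_agree _
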